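-- pv_equiv track=rewrite | github.com/a-kbv/SoftUni | python-dev-advanced/multidimensional_lists_ex/02_2x2_square_in_matrix.py | is_all_char_sane
-- ===== SOURCE A (Python) =====
-- def is_all_char_sane(string):
--     char = string[1]
--     is_valid = True
--     for ch in string:
--         if ch != char:
--             is_valid = False
--             break
--         else:
--             continue
--     return is_valid
-- ===== SOURCE B (Python) =====
-- def is_all_char_sane(string):
--     char = string[1]
--     return string == char * len(string)
-- ===== Notes on version B (the rewrite author's own statement) =====
-- stated objective: idiomatic
-- what changed: Replaces the explicit scan-with-break by a single closed-form comparison of the string against its second character repeated len(string) times.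
import Mathlib
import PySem

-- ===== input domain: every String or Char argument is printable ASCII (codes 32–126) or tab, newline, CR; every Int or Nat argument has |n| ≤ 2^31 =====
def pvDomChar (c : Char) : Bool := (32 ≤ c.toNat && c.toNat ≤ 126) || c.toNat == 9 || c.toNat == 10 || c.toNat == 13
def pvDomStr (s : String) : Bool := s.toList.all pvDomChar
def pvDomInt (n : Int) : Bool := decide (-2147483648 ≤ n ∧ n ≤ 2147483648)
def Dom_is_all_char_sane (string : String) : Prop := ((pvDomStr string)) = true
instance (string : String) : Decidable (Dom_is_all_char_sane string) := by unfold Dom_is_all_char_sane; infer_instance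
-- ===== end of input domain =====

-- B replaces A's explicit scan-with-break by a closed-form comparison against the
-- second character repeated len(string) times (idiomatic; same cost).

-- ===== PORT A =====
-- the for-loop with break: state is `is_valid`, broken out of as `false`
def pvLoopA (char : Char) : List Char → Bool → Bool
  | [], is_valid => is_valid
  | ch :: rest, is_valid => if ch ≠ char then false else pvLoopA char rest is_valid

def is_all_char_sane (string : String) : Bool :=
  match PySem.Str.pyGet? string 1 with
  | none => false   -- unreachable under Pre_: Python raises IndexError here
  | some char => pvLoopA char string.toList true

-- ===== PORT B =====
def is_all_char_sane_alt (string : String) : Bool :=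
  match PySem.Str.pyGet? string 1 with
  | none => false   -- unreachable under Pre_: Python raises IndexError here
  | some char => string.toList == List.replicate string.toList.length char

-- ===== PRECONDITION & SPEC =====
-- Pre_ excludes exactly the strings of length < 2, on which string[1] raises IndexError in both A and B.
def Pre_is_all_char_sane (string : String) : Prop := 2 ≤ string.toList.length
instance (string : String) : Decidable (Pre_is_all_char_sane string) := by unfold Pre_is_all_char_sane; infer_instance
def pvWitness_is_all_char_sane : String := "aa"

def Spec_is_all_char_sane (string : String) (out : Bool) : Prop := out = is_all_char_sane_alt string
instance (string : String) (out : Bool) : Decidable (Spec_is_all_char_sane string out) := by unfold Spec_is_all_char_sane; infer_instance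

-- ===== CLAIM (what is proved, stated in full; the proofs are below) =====
def Claim_equal_is_all_char_sane : Prop := ∀ (string : String), Dom_is_all_char_sane string → Pre_is_all_char_sane string → Spec_is_all_char_sane string (is_all_char_sane string)

-- ===== LEMMAS AND PROOFS =====
theorem pvLoopA_eq_replicate (char : Char) (l : List Char) :
    pvLoopA char l true = (l == List.replicate l.length char) := by
  induction l with
  | nil => rfl
  | cons ch rest ih =>
    by_cases h : ch = char
    · simp [pvLoopA, h, ih, List.replicate]
    · simp [pvLoopA, h, List.replicate]

-- ===== VERDICT (by name: the statement is the Claim_ definition above) =====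
theorem is_all_char_sane_spec : Claim_equal_is_all_char_sane := by
  intro string _ _
  unfold Spec_is_all_char_sane is_all_char_sane is_all_char_sane_alt
  cases PySem.Str.pyGet? string 1 with
  | none => rfl
  | some char => simpa using pvLoopA_eq_replicate char string.toList
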